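-- pv_equiv track=rewrite | github.com/teljoa/p | PYTHON/Tema 2/Ejercicios/Boletin Modular 2/Boletin completo.py | getNumberOfDigitsHexadecimal
-- ===== SOURCE A (Python) =====
-- def getNumberOfDigitsHexadecimal(number):
--     count=0
--     listdot=" "
--     listothers=""
--     for i in range(len(number)):
--         if(number[i]=="."):
--             listdot+=number[i]
--         if not(number[i]=="0" or number[i]=="1" or number[i]=="2" or number[i]=="3" or number[i]=="4" or number[i]=="5" or number[i]=="6" or number[i]=="7" or number[i]=="8" or number[i]=="9"or number[i]=="A" or number[i]=="B" or number[i]=="C" or number[i]=="D" or number[i]=="E" or number[i]=="F" or number[i]=="." or number[i]=="-"):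
--             listothers+=number[i]
--         if("-." in number)or (len(listothers)>0)or("-"in number[1:-1])or("-"in number[-1])or("." in (number[0] or number[-1]))or(".." in number)or(".." in listdot):
--             count=None
--         elif ("0" in number[i]) or ("1"in number[i]) or ("2"in number[i]) or ("3"in number[i]) or ("4"in number[i]) or ("5"in number[i]) or ("6"in number[i]) or ("7"in number[i]) or ("8"in number[i]) or("9"in number[i])or("A"in number[i])or("B"in number[i])or("C"in number[i])or("D"in number[i])or("E"in number[i])or("F"in number[i]):
--             count+=1
--     return count
-- ===== SOURCE B (Python) =====
-- def getNumberOfDigitsHexadecimal(number):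
--     HEX = "0123456789ABCDEF"
--     if number:
--         invalid = (any(c not in HEX + ".-" for c in number)
--                    or number.count(".") >= 2
--                    or number[0] == "."
--                    or number[-1] == "-"
--                    or "-" in number[1:-1]
--                    or number.startswith("-."))
--         if invalid:
--             return None
--     return sum(1 for c in number if c in HEX)
-- ===== Notes on version B (the rewrite author's own statement) =====
-- stated objective: faster
-- what changed: A rescans the whole string (substring tests and a growing accumulator) inside every loop iteration; B computes one validity flag with single-pass checks and then counts the hex digits in one pass.
import Mathlib
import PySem

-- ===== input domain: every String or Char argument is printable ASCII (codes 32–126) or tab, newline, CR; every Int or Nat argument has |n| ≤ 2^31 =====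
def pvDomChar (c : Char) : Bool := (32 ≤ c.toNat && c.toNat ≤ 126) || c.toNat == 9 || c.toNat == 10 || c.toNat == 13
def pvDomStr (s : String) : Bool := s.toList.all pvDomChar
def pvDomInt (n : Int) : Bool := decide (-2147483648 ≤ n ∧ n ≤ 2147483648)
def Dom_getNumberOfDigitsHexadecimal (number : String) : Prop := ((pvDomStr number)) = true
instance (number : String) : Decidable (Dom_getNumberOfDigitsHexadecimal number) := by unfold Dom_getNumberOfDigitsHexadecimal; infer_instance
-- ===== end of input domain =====

-- B re-implements A's per-character whole-string rescans as one validity check plus one counting pass (objective: faster, one pass instead of nested rescans).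

-- ===== PORT A =====
-- the `number[i] == "0" or … or number[i] == "F"` equality chain of A
def pvHexEqA (c : Char) : Bool :=
  c == '0' || c == '1' || c == '2' || c == '3' || c == '4' || c == '5' || c == '6' ||
  c == '7' || c == '8' || c == '9' || c == 'A' || c == 'B' || c == 'C' || c == 'D' ||
  c == 'E' || c == 'F'

-- the `"0" in number[i] or … or "F" in number[i]` chain of A (membership in a 1-char string)
def pvHexInA (c : Char) : Bool :=
  PySem.Chars.isIn ['0'] [c] || PySem.Chars.isIn ['1'] [c] || PySem.Chars.isIn ['2'] [c] ||
  PySem.Chars.isIn ['3'] [c] || PySem.Chars.isIn ['4'] [c] || PySem.Chars.isIn ['5'] [c] ||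
  PySem.Chars.isIn ['6'] [c] || PySem.Chars.isIn ['7'] [c] || PySem.Chars.isIn ['8'] [c] ||
  PySem.Chars.isIn ['9'] [c] || PySem.Chars.isIn ['A'] [c] || PySem.Chars.isIn ['B'] [c] ||
  PySem.Chars.isIn ['C'] [c] || PySem.Chars.isIn ['D'] [c] || PySem.Chars.isIn ['E'] [c] ||
  PySem.Chars.isIn ['F'] [c]

-- loop body of A; state = (count, listdot, listothers).
-- `number[0] or number[-1]` : number[0] here is a nonempty 1-char string, hence truthy, so Python's `or` yields number[0].
-- `count += 1` : in Python count is always an int at that point (the invalid flag is monotone), ported as Option.map (· + 1).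
def pvStepA (cs : List Char) (st : Option Int × List Char × List Char) (i : Nat) :
    Option Int × List Char × List Char :=
  let c := cs.getD i ' '
  let listdot := if c == '.' then st.2.1 ++ [c] else st.2.1
  let listothers := if !(pvHexEqA c || c == '.' || c == '-') then st.2.2 ++ [c] else st.2.2
  let count : Option Int :=
    if PySem.Chars.isIn ['-', '.'] cs
        || decide (0 < listothers.length)
        || PySem.Chars.isIn ['-'] (PySem.List.slice cs (some 1) (some (-1)))
        || PySem.Chars.isIn ['-'] [cs.getD (cs.length - 1) ' ']
        || PySem.Chars.isIn ['.'] [cs.getD 0 ' ']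
        || PySem.Chars.isIn ['.', '.'] cs
        || PySem.Chars.isIn ['.', '.'] listdot
    then none
    else if pvHexInA c then st.1.map (· + 1) else st.1
  (count, listdot, listothers)

def getNumberOfDigitsHexadecimal (number : String) : Option Int :=
  let cs := number.toList
  ((List.range cs.length).foldl (pvStepA cs) (some 0, [' '], [])).1

-- ===== PORT B =====
-- `c in "0123456789ABCDEF"`
def pvHexB (c : Char) : Bool := ("0123456789ABCDEF".toList).contains c
-- `c not in HEX + ".-"`
def pvAllowedB (c : Char) : Bool := ("0123456789ABCDEF.-".toList).contains c

def getNumberOfDigitsHexadecimal_alt (number : String) : Option Int :=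
  let cs := number.toList
  let invalid := !cs.isEmpty &&
    (cs.any (fun c => !pvAllowedB c)
      || decide (2 ≤ cs.countP (fun c => c == '.'))
      || cs.getD 0 ' ' == '.'
      || cs.getD (cs.length - 1) ' ' == '-'
      || PySem.Chars.isIn ['-'] (PySem.List.slice cs (some 1) (some (-1)))
      || PySem.Chars.startswith cs ['-', '.'])
  if invalid then none
  else some ((cs.countP pvHexB : Nat) : Int)

-- ===== PRECONDITION & SPEC =====
def Spec_getNumberOfDigitsHexadecimal (number : String) (out : Option Int) : Prop := out = getNumberOfDigitsHexadecimal_alt number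
instance (number : String) (out : Option Int) : Decidable (Spec_getNumberOfDigitsHexadecimal number out) := by unfold Spec_getNumberOfDigitsHexadecimal; infer_instance

-- ===== CLAIM (what is proved, stated in full; the proofs are below) =====
def Claim_equal_getNumberOfDigitsHexadecimal : Prop := ∀ (number : String), Dom_getNumberOfDigitsHexadecimal number → Spec_getNumberOfDigitsHexadecimal number (getNumberOfDigitsHexadecimal number)

-- ===== LEMMAS AND PROOFS =====

-- characters A appends to listothers
def pvBadA (c : Char) : Bool := !(pvHexEqA c || c == '.' || c == '-')

-- A's invalid flag after processing the first k characters (same disjunct order as pvStepA)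
def pvCond (cs : List Char) (k : Nat) : Bool :=
  PySem.Chars.isIn ['-', '.'] cs
  || decide (0 < ((cs.take k).filter pvBadA).length)
  || PySem.Chars.isIn ['-'] (PySem.List.slice cs (some 1) (some (-1)))
  || PySem.Chars.isIn ['-'] [cs.getD (cs.length - 1) ' ']
  || PySem.Chars.isIn ['.'] [cs.getD 0 ' ']
  || PySem.Chars.isIn ['.', '.'] cs
  || decide (2 ≤ (cs.take k).count '.')

-- A's count after processing the first k characters
def pvCnt (cs : List Char) (k : Nat) : Option Int :=
  if k = 0 then some 0
  else if pvCond cs k then none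
  else some (((cs.take k).countP pvHexEqA : Nat) : Int)

lemma pv_single_infix (a : Char) (l : List Char) : [a] <:+: l ↔ a ∈ l := by
  constructor
  · intro h; exact h.subset (by simp)
  · intro h
    obtain ⟨s, t, rfl⟩ := List.append_of_mem h
    exact ⟨s, t, by simp⟩

lemma pv_isIn_single (a b : Char) : PySem.Chars.isIn [a] [b] = (b == a) := by
  rw [Bool.eq_iff_iff, PySem.Chars.isIn_iff_infix, pv_single_infix]
  simp only [List.mem_singleton, beq_iff_eq]
  exact eq_comm

lemma pv_hexInA_eq (c : Char) : pvHexInA c = pvHexEqA c := by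
  simp only [pvHexInA, pvHexEqA, pv_isIn_single]

lemma pv_hexB_eq (c : Char) : pvHexB c = pvHexEqA c := by
  have h : "0123456789ABCDEF".toList =
      ['0','1','2','3','4','5','6','7','8','9','A','B','C','D','E','F'] := rfl
  rw [Bool.eq_iff_iff]
  simp only [pvHexB, pvHexEqA, h, List.contains_cons, List.contains_nil, Bool.or_false,
    Bool.or_eq_true, beq_iff_eq]
  tauto

lemma pv_allowedB_eq (c : Char) : (!pvAllowedB c) = pvBadA c := by
  have h : "0123456789ABCDEF.-".toList =
      ['0','1','2','3','4','5','6','7','8','9','A','B','C','D','E','F','.','-'] := rfl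
  rw [Bool.eq_iff_iff]
  simp only [pvAllowedB, pvBadA, pvHexEqA, h, List.contains_cons, Bool.not_eq_eq_eq_not,
    Bool.not_true, Bool.or_eq_false_iff]
  tauto

lemma pv_dotdot_count (cs : List Char) (h : ['.', '.'] <:+: cs) : 2 ≤ cs.count '.' := by
  have := h.sublist.count_le '.'
  simpa using this

lemma pv_isIn_dotdot (m : Nat) :
    PySem.Chars.isIn ['.', '.'] (' ' :: List.replicate m '.') = decide (2 ≤ m) := by
  rw [Bool.eq_iff_iff, PySem.Chars.isIn_iff_infix]
  simp only [decide_eq_true_eq]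
  constructor
  · intro h
    have := pv_dotdot_count _ h
    simpa [List.count_cons, List.count_replicate_self] using this
  · intro h
    obtain ⟨k, rfl⟩ : ∃ k, m = k + 2 := ⟨m - 2, by omega⟩
    refine ⟨[' '], List.replicate k '.', ?_⟩
    simp [List.replicate_succ]

lemma pv_cond_mono (cs : List Char) (k : Nat) (h : pvCond cs (k + 1) = false) :
    pvCond cs k = false := by
  have hf : ((cs.take k).filter pvBadA).length ≤ ((cs.take (k + 1)).filter pvBadA).length := by
    rw [List.take_add_one, List.filter_append, List.length_append]; omega
  have hcc : (cs.take k).count '.' ≤ (cs.take (k + 1)).count '.' := by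
    rw [List.take_add_one, List.count_append]; omega
  unfold pvCond at h ⊢
  simp only [Bool.or_eq_false_iff, decide_eq_false_iff_not, Nat.not_lt, Nat.not_le] at h ⊢
  obtain ⟨⟨⟨⟨⟨⟨h1, h2⟩, h3⟩, h4⟩, h5⟩, h6⟩, h7⟩ := h
  exact ⟨⟨⟨⟨⟨⟨h1, by omega⟩, h3⟩, h4⟩, h5⟩, h6⟩, by omega⟩

lemma pv_foldA_inv (cs : List Char) (k : Nat) (hk : k ≤ cs.length) :
    (List.range k).foldl (pvStepA cs) (some 0, [' '], []) =
      (pvCnt cs k, ' ' :: List.replicate ((cs.take k).count '.') '.',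
        (cs.take k).filter pvBadA) := by
  induction k with
  | zero => simp [pvCnt]
  | succ k ih =>
    have hlt : k < cs.length := hk
    have hk' : k ≤ cs.length := Nat.le_of_succ_le hk
    rw [List.range_succ, List.foldl_append, ih hk', List.foldl_cons, List.foldl_nil]
    have hgetd : cs.getD k ' ' = cs[k] := List.getD_eq_getElem cs ' ' hlt
    have htake : cs.take (k + 1) = cs.take k ++ [cs[k]] := by
      rw [List.take_add_one, List.getElem?_eq_getElem hlt]; rfl
    have hcount : (cs.take (k + 1)).count '.' =
        (cs.take k).count '.' + if cs[k] == '.' then 1 else 0 := by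
      rw [htake, List.count_append]
      simp [List.count_cons]
    have hld : (if cs[k] == '.'
          then (' ' :: List.replicate ((cs.take k).count '.') '.') ++ [cs[k]]
          else ' ' :: List.replicate ((cs.take k).count '.') '.') =
        ' ' :: List.replicate ((cs.take (k + 1)).count '.') '.' := by
      by_cases hb : cs[k] = '.'
      · simp [hb, hcount, List.replicate_succ']
      · simp [hb, hcount]
    have hoth : (if !(pvHexEqA cs[k] || cs[k] == '.' || cs[k] == '-')
          then (cs.take k).filter pvBadA ++ [cs[k]]
          else (cs.take k).filter pvBadA) =
        (cs.take (k + 1)).filter pvBadA := by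
      rw [htake, List.filter_append]
      by_cases hb : pvBadA cs[k] = true
      · rw [if_pos (by simpa [pvBadA] using hb)]
        simp [List.filter, hb]
      · rw [if_neg (by simpa [pvBadA] using hb)]
        simp [List.filter, hb]
    simp only [pvStepA, hgetd]
    rw [hld, hoth, pv_isIn_dotdot]
    refine Prod.ext ?_ (Prod.ext rfl rfl)
    show (if PySem.Chars.isIn ['-', '.'] cs
        || decide (0 < ((cs.take (k + 1)).filter pvBadA).length)
        || PySem.Chars.isIn ['-'] (PySem.List.slice cs (some 1) (some (-1)))
        || PySem.Chars.isIn ['-'] [cs.getD (cs.length - 1) ' ']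
        || PySem.Chars.isIn ['.'] [cs.getD 0 ' ']
        || PySem.Chars.isIn ['.', '.'] cs
        || decide (2 ≤ (cs.take (k + 1)).count '.')
      then none
      else if pvHexInA cs[k] then (pvCnt cs k).map (· + 1) else pvCnt cs k) = pvCnt cs (k + 1)
    rw [show (PySem.Chars.isIn ['-', '.'] cs
        || decide (0 < ((cs.take (k + 1)).filter pvBadA).length)
        || PySem.Chars.isIn ['-'] (PySem.List.slice cs (some 1) (some (-1)))
        || PySem.Chars.isIn ['-'] [cs.getD (cs.length - 1) ' ']
        || PySem.Chars.isIn ['.'] [cs.getD 0 ' ']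
        || PySem.Chars.isIn ['.', '.'] cs
        || decide (2 ≤ (cs.take (k + 1)).count '.')) = pvCond cs (k + 1) from rfl]
    by_cases hc : pvCond cs (k + 1) = true
    · simp [hc, pvCnt]
    · have hcf : pvCond cs (k + 1) = false := by simpa using hc
      have hck : pvCond cs k = false := pv_cond_mono cs k hcf
      have hcnt : pvCnt cs k = some (((cs.take k).countP pvHexEqA : Nat) : Int) := by
        by_cases hk0 : k = 0
        · subst hk0; simp [pvCnt]
        · simp [pvCnt, hk0, hck]
      have hcp : (cs.take (k + 1)).countP pvHexEqA =
          (cs.take k).countP pvHexEqA + if pvHexEqA cs[k] then 1 else 0 := by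
        rw [htake, List.countP_append]
        simp [List.countP_cons]
      rw [if_neg hc, pv_hexInA_eq, hcnt]
      have hr : pvCnt cs (k + 1) = some (((cs.take (k + 1)).countP pvHexEqA : Nat) : Int) := by
        simp [pvCnt, hcf]
      rw [hr, hcp]
      by_cases hh : pvHexEqA cs[k] = true
      · simp [hh]
      · simp [hh]

lemma pv_slice_eq (cs : List Char) (h : cs ≠ []) :
    PySem.List.slice cs (some 1) (some (-1)) = (cs.drop 1).take (cs.length - 2) := by
  have hn : 0 < cs.length := List.length_pos_iff.mpr h
  have h1 : PySem.List.clampIdx cs.length 1 = 1 := by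
    rw [show (1 : Int) = ((1 : Nat) : Int) from rfl, PySem.List.clampIdx_natCast]
    omega
  simp only [PySem.List.slice, PySem.List.clampIdx_neg_one, h1]
  have : cs.length - 1 - 1 = cs.length - 2 := by omega
  rw [this]

lemma pv_dash_take (s' t : List Char) :
    '-' ∈ (s' ++ '-' :: '.' :: t).take (s'.length + t.length + 1) := by
  induction s' with
  | nil =>
    simp only [List.nil_append, List.length_nil, Nat.zero_add]
    rw [show t.length + 1 = t.length + 1 from rfl, List.take_succ_cons]
    exact List.mem_cons_self
  | cons a s ih =>
    simp only [List.cons_append, List.length_cons]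
    rw [show s.length + 1 + t.length + 1 = (s.length + t.length + 1) + 1 by omega,
      List.take_succ_cons]
    exact List.mem_cons_of_mem a ih

lemma pv_dash_mem_of_infix (cs : List Char) (h : cs ≠ [])
    (hin : ['-', '.'] <:+: cs) :
    ['-', '.'] <+: cs ∨ '-' ∈ PySem.List.slice cs (some 1) (some (-1)) := by
  obtain ⟨s, t, rfl⟩ := hin
  cases s with
  | nil => exact Or.inl ⟨t, by simp⟩
  | cons a s' =>
    right
    rw [pv_slice_eq _ h]
    have hd : ((a :: s') ++ ['-', '.'] ++ t).drop 1 = s' ++ '-' :: '.' :: t := by simp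
    have hl : ((a :: s') ++ ['-', '.'] ++ t).length - 2 = s'.length + t.length + 1 := by
      simp; omega
    rw [hd, hl]
    exact pv_dash_take s' t

lemma pv_cond_eq_invalid (cs : List Char) (h : cs ≠ []) :
    pvCond cs cs.length =
      (cs.any (fun c => !pvAllowedB c)
        || decide (2 ≤ cs.countP (fun c => c == '.'))
        || cs.getD 0 ' ' == '.'
        || cs.getD (cs.length - 1) ' ' == '-'
        || PySem.Chars.isIn ['-'] (PySem.List.slice cs (some 1) (some (-1)))
        || PySem.Chars.startswith cs ['-', '.']) := by
  rw [Bool.eq_iff_iff]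
  have hmono1 : ['-', '.'] <:+: cs →
      ['-', '.'] <+: cs ∨ '-' ∈ PySem.List.slice cs (some 1) (some (-1)) :=
    pv_dash_mem_of_infix cs h
  have hmono2 : ['.', '.'] <:+: cs → 2 ≤ cs.count '.' := pv_dotdot_count cs
  have hpre : ['-', '.'] <+: cs → ['-', '.'] <:+: cs := List.IsPrefix.isInfix
  simp only [pvCond, Bool.or_eq_true, decide_eq_true_eq, List.take_length,
    List.any_eq_true, pv_allowedB_eq, pv_isIn_single, PySem.Chars.isIn_iff_infix,
    pv_single_infix, PySem.Chars.startswith, List.isPrefixOf_iff_prefix,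
    List.length_pos_iff, Ne, List.filter_eq_nil_iff, beq_iff_eq, not_forall, not_not,
    List.count_eq_countP] at hmono1 hmono2 hpre ⊢
  constructor
  · rintro ((((((h1 | h2) | h3) | h4) | h5) | h6) | h7)
    · rcases hmono1 h1 with hp | hm
      · exact Or.inr hp
      · exact Or.inl (Or.inr hm)
    · obtain ⟨x, hx, hp⟩ := h2
      exact Or.inl (Or.inl (Or.inl (Or.inl (Or.inl ⟨x, hx, hp⟩))))
    · exact Or.inl (Or.inr h3)
    · exact Or.inl (Or.inl (Or.inr h4))
    · exact Or.inl (Or.inl (Or.inl (Or.inr h5)))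
    · exact Or.inl (Or.inl (Or.inl (Or.inl (Or.inr (hmono2 h6)))))
    · exact Or.inl (Or.inl (Or.inl (Or.inl (Or.inr h7))))
  · rintro (((((h1 | h2) | h3) | h4) | h5) | h6)
    · obtain ⟨x, hx, hp⟩ := h1
      exact Or.inl (Or.inl (Or.inl (Or.inl (Or.inl (Or.inr ⟨x, hx, hp⟩)))))
    · exact Or.inr h2
    · exact Or.inl (Or.inl (Or.inr h3))
    · exact Or.inl (Or.inl (Or.inl (Or.inr h4)))
    · exact Or.inl (Or.inl (Or.inl (Or.inl (Or.inr h5))))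
    · exact Or.inl (Or.inl (Or.inl (Or.inl (Or.inl (Or.inl (hpre h6))))))

-- ===== VERDICT (by name: the statement is the Claim_ definition above) =====
theorem getNumberOfDigitsHexadecimal_spec : Claim_equal_getNumberOfDigitsHexadecimal := by
  intro number _
  unfold Spec_getNumberOfDigitsHexadecimal
  by_cases h : number.toList = []
  · simp [getNumberOfDigitsHexadecimal, getNumberOfDigitsHexadecimal_alt, h]
  · have hn : number.toList.length ≠ 0 := by
      simpa [List.length_eq_zero_iff] using h
    have hne : number.toList.isEmpty = false := by
      simpa [List.isEmpty_iff] using h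
    simp only [getNumberOfDigitsHexadecimal, getNumberOfDigitsHexadecimal_alt, hne,
      Bool.not_false, Bool.true_and]
    rw [pv_foldA_inv number.toList number.toList.length le_rfl]
    show pvCnt number.toList number.toList.length = _
    unfold pvCnt
    rw [if_neg hn, pv_cond_eq_invalid number.toList h, List.take_length]
    by_cases hb : ((number.toList.any fun c => !pvAllowedB c)
        || decide (2 ≤ List.countP (fun c => c == '.') number.toList)
        || number.toList.getD 0 ' ' == '.'
        || number.toList.getD (number.toList.length - 1) ' ' == '-'
        || PySem.Chars.isIn ['-'] (PySem.List.slice number.toList (some 1) (some (-1)))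
        || PySem.Chars.startswith number.toList ['-', '.']) = true
    · rw [if_pos hb, if_pos hb]
    · rw [if_neg hb, if_neg hb]
      have hcp : List.countP pvHexB number.toList = List.countP pvHexEqA number.toList :=
        List.countP_congr (fun c _ => by simp [pv_hexB_eq])
      rw [hcp]
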